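-- pv_equiv track=rewrite | github.com/wren-projects/CCC | 2025/level4/main.py | solve
-- ===== SOURCE A (Python) =====
-- def solve(X: int) -> list[int]:
--     i = -1
--     moves = [0]
--     if X % 2 == 0:
--         for i in range(abs(X) // 2):
--             moves.append(max(5 - i, 1))
--
--         moves += moves[::-1]
--     else:
--         for i in range((abs(X) - 1) // 2):
--             moves.append(max(5 - i, 1))
--
--         moves += [max(4 - i, 1)] + moves[::-1]
--
--     if X < 0:
--         moves = [-1 * move for move in moves]
--
--     return moves
-- ===== SOURCE B (Python) =====
-- def solve(X: int) -> list[int]: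
--     # One pass over the final positions: the list is a palindrome (up to sign) of
--     # length abs(X) + 2 whose element at distance d from the nearer end is
--     # 0 if d == 0 else max(6 - d, 1), all multiplied by the sign of X.
--     L = abs(X) + 2
--     s = -1 if X < 0 else 1
--     return [0 if min(j, L - 1 - j) == 0 else s * max(6 - min(j, L - 1 - j), 1)
--             for j in range(L)]
-- ===== Notes on version B (the rewrite author's own statement) =====
-- stated objective: simpler
-- what changed: Replaces the build-half/mirror/negate construction (separate even and odd branches plus a leaked loop variable for the odd middle element) by a single comprehension over all positions using the closed form d = min(j, L-1-j): zero at the two ends, else sign(X)*max(6-d, 1).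
import Mathlib
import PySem

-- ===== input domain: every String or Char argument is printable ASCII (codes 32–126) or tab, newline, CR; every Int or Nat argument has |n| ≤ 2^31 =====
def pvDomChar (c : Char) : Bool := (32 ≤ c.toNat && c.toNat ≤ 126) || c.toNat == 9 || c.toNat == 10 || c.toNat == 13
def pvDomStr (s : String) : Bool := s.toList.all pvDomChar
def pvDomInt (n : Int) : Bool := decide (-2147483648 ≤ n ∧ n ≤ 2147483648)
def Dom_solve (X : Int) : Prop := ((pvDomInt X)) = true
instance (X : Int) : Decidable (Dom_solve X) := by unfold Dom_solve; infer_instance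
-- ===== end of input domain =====

-- B replaces A's build-half/mirror/negate construction (with separate even/odd
-- branches and a leaked loop variable for the odd middle element) by a single
-- pass over all positions with a closed form per element (objective: simpler).

-- ===== PORT A =====
def solve (X : Int) : List Int :=
  let i : Int := -1
  let moves : List Int := [0]
  let st : Int × List Int :=
    if PySem.Int.mod X 2 = 0 then
      let st := (PySem.List.pyRange 0 (PySem.Int.floordiv |X| 2) 1).foldl
        (fun (st : Int × List Int) k => (k, st.2 ++ [max (5 - k) 1])) (i, moves)
      (st.1, st.2 ++ ((PySem.List.slice? st.2 none none (-1)).getD []))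
    else
      let st := (PySem.List.pyRange 0 (PySem.Int.floordiv (|X| - 1) 2) 1).foldl
        (fun (st : Int × List Int) k => (k, st.2 ++ [max (5 - k) 1])) (i, moves)
      (st.1, st.2 ++ [max (4 - st.1) 1] ++ ((PySem.List.slice? st.2 none none (-1)).getD []))
  if X < 0 then st.2.map (fun move => -1 * move) else st.2

-- ===== PORT B =====
def solve_alt (X : Int) : List Int :=
  let L : Int := |X| + 2
  let s : Int := if X < 0 then -1 else 1
  (PySem.List.pyRange 0 L 1).map (fun j =>
    if min j (L - 1 - j) = 0 then 0 else s * max (6 - min j (L - 1 - j)) 1)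

-- ===== PRECONDITION & SPEC =====
def Spec_solve (X : Int) (out : List Int) : Prop := out = solve_alt X
instance (X : Int) (out : List Int) : Decidable (Spec_solve X out) := by unfold Spec_solve; infer_instance

-- ===== CLAIM (what is proved, stated in full; the proofs are below) =====
def Claim_equal_solve : Prop := ∀ (X : Int), Dom_solve X → Spec_solve X (solve X)

-- ===== LEMMAS AND PROOFS =====

-- `pList h` is the half list A builds ([0] plus the loop's appends);
-- `BL s n` is B's list for |X| = n and sign factor s.
def pList (h : Nat) : List Int := 0 :: (List.range h).map (fun (k : Nat) => max (5 - (k:Int)) 1)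
def FB (s : Int) (n : Nat) (j : Int) : Int :=
  if min j ((n:Int) + 1 - j) = 0 then 0 else s * max (6 - min j ((n:Int) + 1 - j)) 1
def BL (s : Int) (n : Nat) : List Int := (List.range (n+2)).map (fun (j : Nat) => FB s n (j:Int))

theorem length_pList (h : Nat) : (pList h).length = h + 1 := by simp [pList]

theorem pList_get (h k : Nat) (hk : k < h + 1) :
    (pList h)[k]'(by simp [pList]; omega) = if k = 0 then (0:Int) else max (6 - (k:Int)) 1 := by
  cases k with
  | zero => simp [pList]
  | succ m =>
    have h1 : (pList h)[m+1]'(by simp [pList]; omega)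
        = ((List.range h).map (fun (k : Nat) => max (5 - (k:Int)) 1))[m]'(by simp; omega) := rfl
    rw [h1, List.getElem_map, List.getElem_range]
    rw [if_neg (by omega : ¬ (m + 1 = 0))]
    congr 1
    push_cast
    ring

theorem foldl_app (l : List Int) (i0 : Int) (ms : List Int) :
    l.foldl (fun (st : Int × List Int) k => (k, st.2 ++ [max (5 - k) 1])) (i0, ms)
      = (l.getLastD i0, ms ++ l.map (fun k => max (5 - k) 1)) := by
  induction l generalizing i0 ms with
  | nil => simp
  | cons a t ih =>
    simp only [List.foldl_cons, ih]
    refine Prod.ext ?_ (by simp)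
    cases t <;> simp [List.getLastD]

theorem lastI (h : Nat) : ((List.range h).map (fun (k : Nat) => ((k:Int)))).getLastD (-1) = (h:Int) - 1 := by
  cases h with
  | zero => simp
  | succ m => simp [List.range_succ]

theorem pyRange_cast (h : Nat) :
    PySem.List.pyRange 0 (h:Int) 1 = (List.range h).map (fun (k : Nat) => (k:Int)) := by
  rw [PySem.List.pyRange_one]
  simp

theorem map_pList (h : Nat) :
    ((List.range h).map (fun (k : Nat) => (k:Int))).map (fun k => max (5 - k) 1)
      = (List.range h).map (fun (k : Nat) => max (5 - (k:Int)) 1) := by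
  rw [List.map_map]; rfl

theorem BL_get (s : Int) (n k : Nat) (hk : k < n + 2) :
    (BL s n)[k]'(by simp [BL]; omega) = FB s n (k:Int) := by
  have h1 : (BL s n)[k]'(by simp [BL]; omega)
      = ((List.range (n+2)).map (fun (j : Nat) => FB s n (j:Int)))[k]'(by simp; omega) := rfl
  rw [h1, List.getElem_map, List.getElem_range]

theorem core_even (h : Nat) :
    pList h ++ (pList h).reverse = BL 1 (2*h) := by
  apply List.ext_getElem
  · simp [pList, BL]; omega
  · intro k hk1 hk2
    have hk : k < 2*h + 2 := by simpa [BL] using hk2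
    rw [BL_get 1 (2*h) k hk]
    by_cases hkh : k < h + 1
    · rw [List.getElem_append_left (by simpa [length_pList] using hkh)]
      rw [pList_get h k hkh, FB]
      have hmin : min (k:Int) (((2*h:Nat):Int) + 1 - (k:Int)) = (k:Int) := by
        apply min_eq_left; push_cast; omega
      rw [hmin]
      simp
    · have hkl : (pList h).length ≤ k := by rw [length_pList]; omega
      rw [List.getElem_append_right hkl, List.getElem_reverse]
      have hidx : (pList h).length - 1 - (k - (pList h).length) = 2*h + 1 - k := by
        rw [length_pList]; omega
      simp only [hidx]
      rw [pList_get h (2*h+1-k) (by omega), FB]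
      have hmin : min (k:Int) (((2*h:Nat):Int) + 1 - (k:Int)) = ((2*h+1-k : Nat):Int) := by
        push_cast [Nat.cast_sub (by omega : k ≤ 2*h+1)]
        omega
      rw [hmin]
      simp

theorem core_odd (h : Nat) :
    (pList h ++ [max (5 - (h:Int)) 1]) ++ (pList h).reverse = BL 1 (2*h+1) := by
  apply List.ext_getElem
  · simp [pList, BL]; omega
  · intro k hk1 hk2
    have hk : k < 2*h + 3 := by simpa [BL] using hk2
    rw [BL_get 1 (2*h+1) k hk]
    by_cases hkh : k < h + 1
    · rw [List.getElem_append_left (by simp [length_pList]; omega),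
        List.getElem_append_left (by simpa [length_pList] using hkh)]
      rw [pList_get h k hkh, FB]
      have hmin : min (k:Int) (((2*h+1:Nat):Int) + 1 - (k:Int)) = (k:Int) := by
        apply min_eq_left; push_cast; omega
      rw [hmin]
      simp
    · by_cases hmid : k = h + 1
      · subst hmid
        rw [List.getElem_append_left (by simp [length_pList])]
        have hmi : (pList h ++ [max (5 - (h:Int)) 1])[h+1]'(by simp [length_pList])
            = [max (5 - (h:Int)) 1][(h+1) - (pList h).length]'(by simp [length_pList]) := by
          apply List.getElem_append_right
          rw [length_pList]
        rw [hmi]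
        have hidx : (h+1) - (pList h).length = 0 := by rw [length_pList]; omega
        simp only [hidx, List.getElem_cons_zero]
        rw [FB]
        have hmin : min ((h+1:Nat):Int) (((2*h+1:Nat):Int) + 1 - ((h+1:Nat):Int)) = (h:Int) + 1 := by
          omega
        rw [hmin, if_neg (by omega), one_mul]
        congr 1
        ring
      · have hkl : (pList h ++ [max (5 - (h:Int)) 1]).length ≤ k := by
          simp [length_pList]; omega
        rw [List.getElem_append_right hkl, List.getElem_reverse]
        have hidx : (pList h).length - 1 - (k - (pList h ++ [max (5 - (h:Int)) 1]).length) = 2*h + 2 - k := by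
          simp [length_pList]; omega
        simp only [hidx]
        rw [pList_get h (2*h+2-k) (by omega), FB]
        have hmin : min (k:Int) (((2*h+1:Nat):Int) + 1 - (k:Int)) = ((2*h+2-k : Nat):Int) := by
          omega
        rw [hmin]
        simp

theorem BL_neg (n : Nat) : BL (-1) n = (BL 1 n).map (fun m => -1 * m) := by
  rw [BL, BL, List.map_map]
  apply List.map_congr_left
  intro j _
  simp only [Function.comp]
  rw [FB, FB]
  split_ifs <;> ring

theorem alt_eq_BL (X : Int) : solve_alt X = BL (if X < 0 then -1 else 1) X.natAbs := by
  simp only [solve_alt, Int.abs_eq_natAbs]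
  rw [show ((X.natAbs : Int) + 2) = ((X.natAbs + 2 : Nat) : Int) by push_cast; ring]
  rw [pyRange_cast, List.map_map, BL]
  apply List.map_congr_left
  intro j _
  simp only [Function.comp, FB]
  rw [show ((X.natAbs + 2 : Nat) : Int) - 1 - (j:Int) = (X.natAbs : Int) + 1 - (j:Int) by push_cast; ring]

theorem a_eq_BL (X : Int) : solve X = BL (if X < 0 then -1 else 1) X.natAbs := by
  simp only [solve, Int.abs_eq_natAbs]
  rw [PySem.Int.mod_eq_emod_of_pos (by norm_num)]
  have hpar : X % 2 = 0 ↔ X.natAbs % 2 = 0 := by omega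
  by_cases hev : X.natAbs % 2 = 0
  · rw [if_pos (hpar.mpr hev)]
    rw [show PySem.Int.floordiv (X.natAbs : Int) 2 = ((X.natAbs / 2 : Nat) : Int) by
      exact_mod_cast PySem.Int.floordiv_natCast X.natAbs 2]
    rw [pyRange_cast, foldl_app, map_pList, PySem.List.slice?_none_none_neg_one]
    have hp : (0 : Int) :: (List.range (X.natAbs / 2)).map (fun (k : Nat) => max (5 - (k:Int)) 1)
        = pList (X.natAbs / 2) := rfl
    simp only [List.singleton_append, Option.getD_some, hp]
    rw [core_even, show 2 * (X.natAbs / 2) = X.natAbs by omega]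
    by_cases hneg : X < 0
    · rw [if_pos hneg, if_pos hneg, BL_neg]
    · rw [if_neg hneg, if_neg hneg]
  · rw [if_neg (fun hc => hev (hpar.mp hc))]
    have h1 : (X.natAbs : Int) - 1 = ((X.natAbs - 1 : Nat) : Int) := by
      push_cast [Nat.cast_sub (by omega : 1 ≤ X.natAbs)]; ring
    rw [h1, show PySem.Int.floordiv ((X.natAbs - 1 : Nat) : Int) 2 = (((X.natAbs - 1) / 2 : Nat) : Int) by
      exact_mod_cast PySem.Int.floordiv_natCast (X.natAbs - 1) 2]
    rw [pyRange_cast, foldl_app, map_pList, lastI, PySem.List.slice?_none_none_neg_one]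
    have hp : (0 : Int) :: (List.range ((X.natAbs - 1) / 2)).map (fun (k : Nat) => max (5 - (k:Int)) 1)
        = pList ((X.natAbs - 1) / 2) := rfl
    simp only [List.singleton_append, Option.getD_some, hp]
    rw [show (4 : Int) - ((((X.natAbs - 1) / 2 : Nat):Int) - 1) = 5 - (((X.natAbs - 1) / 2 : Nat):Int) by ring]
    rw [core_odd, show 2 * ((X.natAbs - 1) / 2) + 1 = X.natAbs by omega]
    by_cases hneg : X < 0
    · rw [if_pos hneg, if_pos hneg, BL_neg]
    · rw [if_neg hneg, if_neg hneg]

-- ===== VERDICT (by name: the statement is the Claim_ definition above) =====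
theorem solve_spec : Claim_equal_solve := by
  intro X _
  unfold Spec_solve
  rw [a_eq_BL, alt_eq_BL]
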